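-- pv_equiv track=rewrite | github.com/mikkelkrogsholm/maskemania | skills/hækling/croclib/constructions/filet.py | _row_recipe
-- ===== SOURCE A (Python) =====
-- def _row_recipe(cells: list[bool]) -> str:
--     """Translate a row of cells into a compact instruction.
--
--     Adjacent same-type cells get grouped: "3 åbne, 2 fyldte" → cleaner text.
--     """
--     if not cells:
--         return "(tom række)"
--     out: list[str] = []
--     run_type = cells[0]
--     run_count = 1
--     for c in cells[1:]:
--         if c == run_type:
--             run_count += 1
--         else:
--             out.append(_describe_run(run_type, run_count))
--             run_type = c
--             run_count = 1
--     out.append(_describe_run(run_type, run_count))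
--     return ", ".join(out)
--
-- def _describe_run(filled: bool, n: int) -> str:
--     if filled:
--         if n == 1:
--             return "1 fyldt celle (3 stm)"
--         return f"{n} fyldte celler ({n} × 3 stm i træk)"
--     if n == 1:
--         return "1 åben celle (lm 2, spring 2 over, 1 stm)"
--     return (f"{n} åbne celler ([lm 2, spring 2 over, 1 stm] × {n})")
-- ===== SOURCE B (Python) =====
-- def _row_recipe(cells: list[bool]) -> str:
--     """Translate a row of cells into a compact instruction.
--
--     Two staged passes: first compute every boundary position where the
--     value changes (plus the ends), then render each run from consecutive
--     boundary pairs.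
--     """
--     if not cells:
--         return "(tom række)"
--     n = len(cells)
--     bounds = [0] + [i for i in range(1, n) if cells[i] != cells[i - 1]] + [n]
--     return ", ".join(
--         _describe_run(cells[a], b - a) for a, b in zip(bounds, bounds[1:])
--     )
--
-- def _describe_run(filled: bool, n: int) -> str:
--     if filled:
--         if n == 1:
--             return "1 fyldt celle (3 stm)"
--         return f"{n} fyldte celler ({n} × 3 stm i træk)"
--     if n == 1:
--         return "1 åben celle (lm 2, spring 2 over, 1 stm)"
--     return (f"{n} åbne celler ([lm 2, spring 2 over, 1 stm] × {n})")
-- ===== Notes on version B (the rewrite author's own statement) =====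
-- stated objective: alternative
-- what changed: B replaces A's single stateful run_type/run_count loop by two staged passes: it first materialises the list of boundary positions where adjacent cells differ (plus both ends), then describes each run from consecutive boundary pairs via zip.
import Mathlib
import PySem

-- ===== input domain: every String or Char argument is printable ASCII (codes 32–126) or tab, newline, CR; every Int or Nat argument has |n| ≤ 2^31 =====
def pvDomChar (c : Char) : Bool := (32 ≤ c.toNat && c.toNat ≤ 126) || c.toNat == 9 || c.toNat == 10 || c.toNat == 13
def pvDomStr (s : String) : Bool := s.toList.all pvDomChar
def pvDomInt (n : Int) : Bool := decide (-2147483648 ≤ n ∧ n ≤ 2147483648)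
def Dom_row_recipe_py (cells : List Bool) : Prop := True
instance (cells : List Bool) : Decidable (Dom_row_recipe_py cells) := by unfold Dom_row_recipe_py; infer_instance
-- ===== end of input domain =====

-- B computes, in two staged passes, the list of boundary positions where the value changes
-- (plus both ends) and then renders each run from consecutive boundary pairs (zip);
-- A maintains run_type/run_count accumulator state across one element-wise loop. Same result, proved equal.

-- shared helper: port of _describe_run (identical in Source A and Source B)
def pvDescribeRun (filled : Bool) (n : Nat) : String :=
  if filled then
    if n == 1 then "1 fyldt celle (3 stm)"
    else PySem.Int.toStr n ++ " fyldte celler (" ++ PySem.Int.toStr n ++ " × 3 stm i træk)"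
  else
    if n == 1 then "1 åben celle (lm 2, spring 2 over, 1 stm)"
    else PySem.Int.toStr n ++ " åbne celler ([lm 2, spring 2 over, 1 stm] × " ++ PySem.Int.toStr n ++ ")"

-- ===== PORT A =====
-- the for-loop over cells[1:] with state (out, run_type, run_count)
def pvLoopA (out : List String) (run_type : Bool) (run_count : Nat) : List Bool → String
  | [] => String.intercalate ", " (out ++ [pvDescribeRun run_type run_count])
  | c :: cs =>
    if c == run_type then pvLoopA out run_type (run_count + 1) cs
    else pvLoopA (out ++ [pvDescribeRun run_type run_count]) c 1 cs

def row_recipe_py (cells : List Bool) : String :=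
  match cells with
  | [] => "(tom række)"
  | c0 :: rest => pvLoopA [] c0 1 rest

-- ===== PORT B =====
-- the comprehension [i for i in range(1, n) if cells[i] != cells[i - 1]]
-- (cells.getD i false is exact for Python's cells[i]: every i drawn from range(1, n) is in range)
def pvBoundsMid (cells : List Bool) : List Nat :=
  (List.range' 1 (cells.length - 1)).filter
    (fun i => !(cells.getD i false == cells.getD (i - 1) false))

def row_recipe_py_alt (cells : List Bool) : String :=
  match cells with
  | [] => "(tom række)"
  | _ :: _ =>
    let bounds := 0 :: pvBoundsMid cells ++ [cells.length]
    String.intercalate ", "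
      ((bounds.zip bounds.tail).map (fun p => pvDescribeRun (cells.getD p.1 false) (p.2 - p.1)))

-- ===== PRECONDITION & SPEC =====
def Spec_row_recipe_py (cells : List Bool) (out : String) : Prop := out = row_recipe_py_alt cells
instance (cells : List Bool) (out : String) : Decidable (Spec_row_recipe_py cells out) := by unfold Spec_row_recipe_py; infer_instance

-- ===== CLAIM (what is proved, stated in full; the proofs are below) =====
def Claim_equal_row_recipe_py : Prop := ∀ (cells : List Bool), Dom_row_recipe_py cells → Spec_row_recipe_py cells (row_recipe_py cells)

-- ===== LEMMAS AND PROOFS =====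

-- proof-level description of a row as its list of maximal runs (value, length)
def pvRuns : List Bool → List (Bool × Nat)
  | [] => []
  | x :: xs =>
    (x, (xs.takeWhile (· == x)).length + 1) :: pvRuns (xs.dropWhile (· == x))
  termination_by l => l.length
  decreasing_by
    have := List.length_dropWhile_le (p := (· == x)) (l := xs)
    simp; omega

lemma pvRuns_nil : pvRuns [] = [] := by rw [pvRuns]

lemma pvRuns_cons (x : Bool) (xs : List Bool) :
    pvRuns (x :: xs) =
      (x, (xs.takeWhile (· == x)).length + 1) :: pvRuns (xs.dropWhile (· == x)) := by
  rw [pvRuns]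

-- A's loop with pending run (t, k) produces the join of out ++ descriptions of the runs
lemma pvLoopA_eq (xs : List Bool) : ∀ (out : List String) (t : Bool) (k : Nat),
    pvLoopA out t k xs =
      String.intercalate ", "
        (out ++ (((t, k + (xs.takeWhile (· == t)).length) ::
                  pvRuns (xs.dropWhile (· == t))).map (fun p => pvDescribeRun p.1 p.2))) := by
  induction xs with
  | nil => intro out t k; simp [pvLoopA, pvRuns_nil]
  | cons c cs ih =>
    intro out t k
    by_cases h : c = t
    · subst h
      rw [pvLoopA, if_pos (by simp)]
      rw [ih]
      simp [List.takeWhile, List.dropWhile]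
      ring_nf
    · rw [pvLoopA, if_neg (by simp [h])]
      rw [ih]
      have ht : (c == t) = false := by simp [h]
      simp [List.takeWhile, List.dropWhile, ht, pvRuns_cons, Nat.add_comm]

-- the first run of x :: xs is constantly x
lemma pvGetD_first (x : Bool) (xs : List Bool) (i : Nat)
    (h : i < (xs.takeWhile (· == x)).length + 1) : (x :: xs).getD i false = x := by
  match i with
  | 0 => rfl
  | Nat.succ j =>
    have hj : j < (xs.takeWhile (· == x)).length := by omega
    show xs.getD j false = x
    conv_lhs => rw [← List.takeWhile_append_dropWhile (p := (· == x)) (l := xs)]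
    rw [List.getD_append _ _ _ _ hj, List.getD_eq_getElem _ _ hj]
    have := List.mem_takeWhile_imp (p := (· == x)) (l := xs)
      (List.getElem_mem (l := xs.takeWhile (· == x)) hj)
    simpa using this

-- reading x :: xs past its first run is reading its dropWhile tail
lemma pvGetD_shift (x : Bool) (xs : List Bool) (k : Nat) :
    (x :: xs).getD ((xs.takeWhile (· == x)).length + 1 + k) false
      = (xs.dropWhile (· == x)).getD k false := by
  have hsplit : x :: xs = (x :: xs.takeWhile (· == x)) ++ xs.dropWhile (· == x) := by
    simp [List.takeWhile_append_dropWhile]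
  rw [hsplit, List.getD_append_right _ _ _ _ (by simp only [List.length_cons]; omega)]
  congr 1
  simp only [List.length_cons]
  omega

-- the boundary list of x :: xs is the shifted boundary list of its dropWhile tail,
-- preceded by the first run's end (when the tail is nonempty)
lemma pvBoundsMid_cons (x : Bool) (xs : List Bool) :
    pvBoundsMid (x :: xs) =
      if xs.dropWhile (· == x) = [] then []
      else ((xs.takeWhile (· == x)).length + 1)
             :: (pvBoundsMid (xs.dropWhile (· == x))).map
                  (fun i => ((xs.takeWhile (· == x)).length + 1) + i) := by
  have hsplit := congrArg List.length (List.takeWhile_append_dropWhile (p := (· == x)) (l := xs))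
  simp only [List.length_append] at hsplit
  have hF : ∀ i, i < (xs.takeWhile (· == x)).length + 1 → (x :: xs).getD i false = x :=
    fun i hi => pvGetD_first x xs i hi
  have hS : ∀ k, (x :: xs).getD ((xs.takeWhile (· == x)).length + 1 + k) false
      = (xs.dropWhile (· == x)).getD k false := fun k => pvGetD_shift x xs k
  obtain ⟨T, hT⟩ : ∃ T, xs.takeWhile (· == x) = T := ⟨_, rfl⟩
  obtain ⟨R, hR⟩ : ∃ R, xs.dropWhile (· == x) = R := ⟨_, rfl⟩
  rw [hT, hR] at hsplit hS ⊢
  rw [hT] at hF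
  unfold pvBoundsMid
  have hn : (x :: xs).length - 1 = T.length + R.length := by simp; omega
  rw [hn]
  rw [← List.range'_append (s := 1) (m := T.length) (n := R.length) (step := 1)]
  rw [List.filter_append]
  have hfirst : (List.range' 1 T.length).filter
      (fun i => !((x :: xs).getD i false == (x :: xs).getD (i - 1) false)) = [] := by
    rw [List.filter_eq_nil_iff]
    intro i hi
    obtain ⟨j, hj, rfl⟩ := List.mem_range'.mp hi
    rw [hF (1 + 1 * j) (by omega), hF (1 + 1 * j - 1) (by omega)]
    simp
  rw [hfirst, List.nil_append]
  rcases R with _ | ⟨r, rs⟩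
  · simp
  · have hstart : 1 + 1 * T.length = T.length + 1 := by omega
    rw [hstart]
    have hcons : List.range' (T.length + 1) (r :: rs).length
        = (T.length + 1) :: List.range' (T.length + 1 + 1) rs.length := by
      simp [List.range']
    rw [hcons]
    have hrx : (r == x) = false := by
      have hne : xs.dropWhile (· == x) ≠ [] := by rw [hR]; simp
      have hh := List.head_dropWhile_not (· == x) hne
      simp only [hR] at hh
      simpa using hh
    have h1 : (x :: xs).getD (T.length + 1) false = r := by
      have := hS 0
      simpa using this
    have h2 : (x :: xs).getD (T.length + 1 - 1) false = x := hF _ (by omega)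
    have hPm : (!((x :: xs).getD (T.length + 1) false
        == (x :: xs).getD (T.length + 1 - 1) false)) = true := by
      rw [h1, h2]; simp [hrx]
    rw [List.filter_cons, if_pos hPm]
    rw [if_neg (by simp : ¬((r :: rs : List Bool) = []))]
    congr 1
    have hmap : List.range' (T.length + 1 + 1) rs.length
        = List.map (fun i => (T.length + 1) + i) (List.range' 1 rs.length) := by
      rw [List.map_add_range']
    rw [hmap, List.filter_map]
    have hlen : (r :: rs).length - 1 = rs.length := by simp
    rw [hlen]
    congr 1
    apply List.filter_congr
    intro i hi
    obtain ⟨j, hj, rfl⟩ := List.mem_range'.mp hi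
    simp only [Function.comp]
    have hs1 : (x :: xs).getD (T.length + 1 + (1 + 1 * j)) false
        = (r :: rs).getD (1 + 1 * j) false := hS _
    have hs2 : (x :: xs).getD (T.length + 1 + (1 + 1 * j) - 1) false
        = (r :: rs).getD (1 + 1 * j - 1) false := by
      have h0 := hS (1 * j)
      have e1 : T.length + 1 + (1 + 1 * j) - 1 = T.length + 1 + 1 * j := by omega
      have e2 : 1 + 1 * j - 1 = 1 * j := by omega
      rw [e1, e2]; exact h0
    rw [hs1, hs2]

-- B's boundary/zip rendering produces the descriptions of the runs
lemma pvAltRuns (cells : List Bool) (h : cells ≠ []) :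
    ((0 :: pvBoundsMid cells ++ [cells.length]).zip (pvBoundsMid cells ++ [cells.length])).map
        (fun p => pvDescribeRun (cells.getD p.1 false) (p.2 - p.1))
      = (pvRuns cells).map (fun p => pvDescribeRun p.1 p.2) := by
  induction cells using pvRuns.induct with
  | case1 => exact absurd rfl h
  | case2 x xs ih =>
    have hsplit := congrArg List.length (List.takeWhile_append_dropWhile (p := (· == x)) (l := xs))
    simp only [List.length_append] at hsplit
    have hS : ∀ k, (x :: xs).getD ((xs.takeWhile (· == x)).length + 1 + k) false
        = (xs.dropWhile (· == x)).getD k false := fun k => pvGetD_shift x xs k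
    rw [pvBoundsMid_cons, pvRuns_cons]
    obtain ⟨T, hT⟩ : ∃ T, xs.takeWhile (· == x) = T := ⟨_, rfl⟩
    obtain ⟨R, hR⟩ : ∃ R, xs.dropWhile (· == x) = R := ⟨_, rfl⟩
    rw [hT, hR] at hsplit hS ⊢
    rw [hR] at ih
    by_cases hr : R = []
    · subst hr
      simp only [List.length_nil] at hsplit
      have hL : (x :: xs).length = T.length + 1 := by
        simp only [List.length_cons]; omega
      rw [hL]
      simp [pvRuns_nil]
    · rw [if_neg hr]
      have hlen : (x :: xs).length = (T.length + 1) + R.length := by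
        simp only [List.length_cons]; omega
      obtain ⟨M, hM⟩ : ∃ M, T.length + 1 = M := ⟨_, rfl⟩
      rw [hM] at hS hlen ⊢
      rw [hlen]
      simp only [List.cons_append]
      have e1 : (M :: (List.map (fun i => M + i) (pvBoundsMid R) ++ [M + R.length]))
          = List.map (fun i => M + i) (0 :: (pvBoundsMid R ++ [R.length])) := by
        simp
      rw [e1]
      have e4 : List.map (fun i => M + i) (0 :: (pvBoundsMid R ++ [R.length]))
          = M :: List.map (fun i => M + i) (pvBoundsMid R ++ [R.length]) := by
        simp
      rw [e4, List.zip_cons_cons, ← e4]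
      have hz := List.zip_map (f := fun i => M + i) (g := fun i => M + i)
        (l₁ := 0 :: (pvBoundsMid R ++ [R.length])) (l₂ := pvBoundsMid R ++ [R.length])
      rw [hz, List.map_cons, List.map_map]
      have hfun : ∀ p : Nat × Nat,
          ((fun p : Nat × Nat => pvDescribeRun ((x :: xs).getD p.1 false) (p.2 - p.1)) ∘
            Prod.map (fun i => M + i) (fun i => M + i)) p
          = (fun p : Nat × Nat => pvDescribeRun (R.getD p.1 false) (p.2 - p.1)) p := by
        intro p
        rcases p with ⟨a, b⟩
        simp only [Function.comp, Prod.map]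
        rw [hS a]
        have harith : M + b - (M + a) = b - a := by omega
        rw [harith]
      rw [List.map_congr_left (fun p _ => hfun p)]
      rw [← List.cons_append]
      rw [ih hr, List.map_cons]
      simp

-- ===== VERDICT (by name: the statement is the Claim_ definition above) =====
theorem row_recipe_py_spec : Claim_equal_row_recipe_py := by
  intro cells _
  unfold Spec_row_recipe_py
  match cells with
  | [] => rfl
  | c0 :: rest =>
    rw [row_recipe_py, row_recipe_py_alt]
    rw [pvLoopA_eq]
    have hB := pvAltRuns (c0 :: rest) (by simp)
    simp only [List.cons_append] at hB ⊢
    simp only [List.tail_cons]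
    rw [hB]
    simp [pvRuns_cons, Nat.add_comm]
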